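-- pv_equiv track=rewrite | github.com/nbssdlkm/FicForge | src-python/core/services/rag_retrieval.py | _format_rag_chunks
-- ===== SOURCE A (Python) =====
-- from typing import Any, Optional
--
-- def _format_rag_chunks(chunks: list[dict[str, Any]]) -> str:
--     """将 chunks 按 collection 分组格式化。"""
--     if not chunks:
--         return ""
--
--     groups: dict[str, list[str]] = {}
--     for c in chunks:
--         coll = c.get("_collection", "other")
--         groups.setdefault(coll, []).append(c.get("content", ""))
--
--     parts: list[str] = []
--     label_map = {
--         "characters": "角色设定",
--         "worldbuilding": "世界观",
--         "chapters": "历史章节片段",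
--     }
--     for coll in ["characters", "worldbuilding", "chapters"]:
--         items = groups.get(coll, [])
--         if items:
--             label = label_map.get(coll, coll)
--             parts.append(f"### {label}")
--             for item in items:
--                 parts.append(item)
--
--     return "\n\n".join(parts)
-- ===== SOURCE B (Python) =====
-- def _format_rag_chunks(chunks: list[dict]) -> str:
--     parts: list[str] = []
--     for coll, label in [("characters", "角色设定"),
--                         ("worldbuilding", "世界观"),
--                         ("chapters", "历史章节片段")]:
--         items = [c.get("content", "") for c in chunks
--                  if c.get("_collection", "other") == coll]
--         if items:
--             parts.append(f"### {label}")
--             parts.extend(items)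
--     return "\n\n".join(parts)
-- ===== Notes on version B (the rewrite author's own statement) =====
-- stated objective: simpler
-- what changed: B drops the grouping dict entirely: it loops over the three (collection,label) pairs and selects each collection's contents by a direct scan/filter of chunks, the empty case falling out of join([]).
import Mathlib
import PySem

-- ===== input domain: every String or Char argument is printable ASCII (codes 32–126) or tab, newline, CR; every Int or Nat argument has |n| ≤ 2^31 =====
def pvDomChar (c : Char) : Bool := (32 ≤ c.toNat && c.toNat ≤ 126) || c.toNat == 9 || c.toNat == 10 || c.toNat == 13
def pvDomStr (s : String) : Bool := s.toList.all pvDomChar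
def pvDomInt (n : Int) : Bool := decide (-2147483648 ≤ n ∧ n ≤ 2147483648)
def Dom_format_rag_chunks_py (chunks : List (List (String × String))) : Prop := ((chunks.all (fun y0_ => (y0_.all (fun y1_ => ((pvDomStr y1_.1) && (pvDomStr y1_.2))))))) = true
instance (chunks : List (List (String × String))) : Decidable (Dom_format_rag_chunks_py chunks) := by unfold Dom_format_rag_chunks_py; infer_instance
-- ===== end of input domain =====

-- B replaces A's grouping dict by one direct scan of the chunks per fixed collection (objective: simpler).

-- ===== PORT A =====
def format_rag_chunks_py (chunks : List (List (String × String))) : String :=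
  if chunks = [] then ""
  else
    -- groups.setdefault(coll, []).append(content)  ==  modify coll [] (· ++ [content])
    let groups : PySem.Dict String (List String) :=
      chunks.foldl (fun g c =>
        g.modify ((PySem.Dict.mk c).getD "_collection" "other") []
          (· ++ [(PySem.Dict.mk c).getD "content" ""])) PySem.Dict.empty
    let label_map : PySem.Dict String String :=
      PySem.Dict.ofList [("characters", "角色设定"), ("worldbuilding", "世界观"), ("chapters", "历史章节片段")]
    let parts : List String :=
      ["characters", "worldbuilding", "chapters"].foldl (fun parts coll =>
        let items := groups.getD coll []
        if items ≠ [] then (parts ++ ["### " ++ label_map.getD coll coll]) ++ items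
        else parts) []
    PySem.Str.join "\n\n" parts

-- ===== PORT B =====
def format_rag_chunks_py_alt (chunks : List (List (String × String))) : String :=
  let parts : List String :=
    [("characters", "角色设定"), ("worldbuilding", "世界观"), ("chapters", "历史章节片段")].foldl
      (fun parts p =>
        let items := (chunks.filter
            (fun c => (PySem.Dict.mk c).getD "_collection" "other" == p.1)).map
          (fun c => (PySem.Dict.mk c).getD "content" "")
        if items ≠ [] then (parts ++ ["### " ++ p.2]) ++ items else parts) []
  PySem.Str.join "\n\n" parts

-- ===== PRECONDITION & SPEC =====
def Spec_format_rag_chunks_py (chunks : List (List (String × String))) (out : String) : Prop := out = format_rag_chunks_py_alt chunks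
instance (chunks : List (List (String × String))) (out : String) : Decidable (Spec_format_rag_chunks_py chunks out) := by unfold Spec_format_rag_chunks_py; infer_instance

-- ===== CLAIM (what is proved, stated in full; the proofs are below) =====
def Claim_equal_format_rag_chunks_py : Prop := ∀ (chunks : List (List (String × String))), Dom_format_rag_chunks_py chunks → Spec_format_rag_chunks_py chunks (format_rag_chunks_py chunks)

-- ===== LEMMAS AND PROOFS =====

-- A's grouping loop, looked up at one collection, is exactly B's filter-map scan.
lemma groups_getD (chunks : List (List (String × String)))
    (g : PySem.Dict String (List String)) (coll : String) :
    (chunks.foldl (fun g c =>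
        g.modify ((PySem.Dict.mk c).getD "_collection" "other") []
          (· ++ [(PySem.Dict.mk c).getD "content" ""])) g).getD coll []
    = g.getD coll [] ++ (chunks.filter
        (fun c => (PySem.Dict.mk c).getD "_collection" "other" == coll)).map
        (fun c => (PySem.Dict.mk c).getD "content" "") := by
  induction chunks generalizing g with
  | nil => simp
  | cons c rest ih =>
    simp only [List.foldl_cons, ih, List.filter_cons]
    rw [PySem.Dict.getD_modify]
    by_cases h : (PySem.Dict.mk c).getD "_collection" "other" = coll
    · simp [h]
    · simp [h, Ne.symm h]

-- ===== VERDICT (by name: the statement is the Claim_ definition above) =====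
theorem format_rag_chunks_py_spec : Claim_equal_format_rag_chunks_py := by
  intro chunks _
  unfold Spec_format_rag_chunks_py format_rag_chunks_py format_rag_chunks_py_alt
  by_cases hnil : chunks = []
  · subst hnil; simp [List.foldl]; decide
  · simp only [if_neg hnil, List.foldl]
    rw [groups_getD, groups_getD, groups_getD]
    simp [PySem.Dict.getD_empty]
    rfl
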